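-- pv_equiv track=rewrite | github.com/anusarati/archipelago | examples/hugging_face_task/hsn_pipeline.py | _max_non_whitespace_run
-- ===== SOURCE A (Python) =====
-- def _max_non_whitespace_run(text: str) -> int:
--     max_run = 0
--     current = 0
--     for ch in text:
--         if ch.isspace():
--             if current > max_run:
--                 max_run = current
--             current = 0
--         else:
--             current += 1
--     return max(max_run, current)
-- ===== SOURCE B (Python) =====
-- def _max_non_whitespace_run(text: str) -> int:
--     return max((len(t) for t in text.split()), default=0)
-- ===== Notes on version B (the rewrite author's own statement) =====
-- stated objective: simpler
-- what changed: Replaces the stateful character scan with running/best counters by tokenization: split() into maximal non-whitespace tokens, then take the max token length (default 0).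
import Mathlib
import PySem

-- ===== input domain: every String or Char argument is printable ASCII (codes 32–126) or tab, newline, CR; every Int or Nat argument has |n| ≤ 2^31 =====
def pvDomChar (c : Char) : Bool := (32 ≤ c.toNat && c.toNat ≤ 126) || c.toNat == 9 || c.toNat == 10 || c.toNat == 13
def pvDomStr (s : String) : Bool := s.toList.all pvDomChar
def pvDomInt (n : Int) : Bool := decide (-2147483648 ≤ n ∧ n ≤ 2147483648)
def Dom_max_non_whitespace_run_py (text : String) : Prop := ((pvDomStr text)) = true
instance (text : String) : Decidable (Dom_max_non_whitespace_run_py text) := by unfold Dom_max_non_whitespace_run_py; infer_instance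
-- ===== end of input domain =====

-- B replaces A's stateful running/best-counter scan by tokenize-then-maximize (split + max of lengths); objective: simpler.

-- ===== PORT A =====
-- A's loop body: state (max_run, current); on whitespace possibly promote current, else extend it.
def pvStepA (st : Int × Int) (ch : Char) : Int × Int :=
  if PySem.Chars.isspace ch then
    (if st.2 > st.1 then (st.2, (0 : Int)) else (st.1, (0 : Int)))
  else (st.1, st.2 + 1)

def max_non_whitespace_run_py (text : String) : Int :=
  let s := text.toList.foldl pvStepA (0, 0)
  max s.1 s.2

-- ===== PORT B =====
-- Source B: max((len(t) for t in text.split()), default=0)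
def max_non_whitespace_run_py_alt (text : String) : Int :=
  (PySem.Str.split₀ text).foldl (fun m t => max m (PySem.Str.len t)) 0

-- ===== PRECONDITION & SPEC =====
def Spec_max_non_whitespace_run_py (text : String) (out : Int) : Prop := out = max_non_whitespace_run_py_alt text
instance (text : String) (out : Int) : Decidable (Spec_max_non_whitespace_run_py text out) := by unfold Spec_max_non_whitespace_run_py; infer_instance

-- ===== CLAIM (what is proved, stated in full; the proofs are below) =====
def Claim_equal_max_non_whitespace_run_py : Prop := ∀ (text : String), Dom_max_non_whitespace_run_py text → Spec_max_non_whitespace_run_py text (max_non_whitespace_run_py text)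

-- ===== LEMMAS AND PROOFS =====

-- split₀.go threads its accumulator: it only ever prepends acc.reverse to the words found.
theorem pvGo_acc (l : List Char) : ∀ (cur : List Char) (acc : List (List Char)),
    PySem.Chars.split₀.go l cur acc = acc.reverse ++ PySem.Chars.split₀.go l cur [] := by
  induction l with
  | nil =>
    intro cur acc
    simp only [PySem.Chars.split₀.go]
    by_cases h : cur.isEmpty <;> simp [h]
  | cons c rest ih =>
    intro cur acc
    simp only [PySem.Chars.split₀.go]
    by_cases hs : PySem.Chars.isspace c
    · by_cases hc : cur.isEmpty
      · simp only [hs, hc, if_true]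
        exact ih [] acc
      · simp only [hs, hc, if_true, if_false, Bool.false_eq_true]
        rw [ih [] (cur.reverse :: acc), ih [] [cur.reverse]]
        simp
    · simp only [hs, Bool.false_eq_true, if_false]
      exact ih (c :: cur) acc

-- Loop invariant: A's scan from (m, |cur|) computes the fold of token lengths over the words
-- that split₀.go still produces from the pending word cur, started at m.
theorem pvMain (l : List Char) : ∀ (cur : List Char) (m : Int), 0 ≤ m →
    (let s := l.foldl pvStepA (m, (cur.length : Int)); max s.1 s.2)
      = (PySem.Chars.split₀.go l cur []).foldl (fun a t => max a ((t.length : Int))) m := by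
  induction l with
  | nil =>
    intro cur m hm
    simp only [List.foldl_nil, PySem.Chars.split₀.go]
    by_cases hc : cur.isEmpty
    · rw [List.isEmpty_iff] at hc
      subst hc
      simp; omega
    · simp [hc]
  | cons c rest ih =>
    intro cur m hm
    simp only [List.foldl_cons, PySem.Chars.split₀.go]
    by_cases hs : PySem.Chars.isspace c
    · by_cases hc : cur.isEmpty
      · rw [List.isEmpty_iff] at hc
        subst hc
        have hstep : pvStepA (m, 0) c = (m, 0) := by
          simp [pvStepA, hs]; omega
        simp only [hs, List.isEmpty_nil, if_true, List.length_nil, Nat.cast_zero, hstep]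
        simpa using ih [] m hm
      · have hstep : pvStepA (m, (cur.length : Int)) c = (max m (cur.length : Int), 0) := by
          simp only [pvStepA, hs, if_true]
          split_ifs with h <;> simp <;> omega
        rw [hstep]
        rw [pvGo_acc rest [] [cur.reverse]]
        simp only [hs, hc, if_true, if_false, Bool.false_eq_true, List.reverse_cons,
          List.reverse_nil, List.nil_append, List.cons_append, List.foldl_cons]
        have := ih [] (max m (cur.length : Int)) (le_trans hm (le_max_left _ _))
        simpa using this
    · simp only [hs, Bool.false_eq_true, if_false]
      have hstep : pvStepA (m, (cur.length : Int)) c = (m, ((c :: cur).length : Int)) := by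
        simp [pvStepA, hs]
      rw [hstep]
      exact ih (c :: cur) m hm

-- ===== VERDICT (by name: the statement is the Claim_ definition above) =====
theorem max_non_whitespace_run_py_spec : Claim_equal_max_non_whitespace_run_py := by
  intro text _
  unfold Spec_max_non_whitespace_run_py max_non_whitespace_run_py max_non_whitespace_run_py_alt
  have hB : (PySem.Str.split₀ text).foldl (fun m t => max m (PySem.Str.len t)) 0
      = (PySem.Chars.split₀ text.toList).foldl (fun a t => max a ((t.length : Int))) 0 := by
    rw [← PySem.Str.split₀_map_toList, List.foldl_map]
    simp [PySem.Str.len_eq]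
  rw [hB]
  have := pvMain text.toList [] 0 le_rfl
  simpa [PySem.Chars.split₀] using this
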